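/- GENERATED by mk_final_copies.py from the proof of the farm's unit `free` (farm:free.1: Proof.lean) as the
   re-elaboration sweep compiled it — do not edit. -/
import Vorbis.Spec.Units.free

open X86 X86.User Asan Vorbis

set_option maxRecDepth 4000
set_option maxHeartbeats 4000000

/-- `free(p)` satisfies its contract: a single `ret` (0x101820, libc.c:52), no store, so the shadow is untouched. -/
theorem Vorbis.Spec.Worked.free_ok : Vorbis.Spec.free.Statement := by
  intro Lay hLay μ hμ u₀ hcode others frames u ret he hpre
  v_entry he
  -- 0x101820: `ret` (libc.c:52 `}`)
  u_walk hcode [hμ.vendor] span [Vorbis.L.textLo, Vorbis.L.textHi] side (v_side)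
  -- the state after the `ret`: the contract's `Returned`
  refine ReachVia.done ?_
  v_returned
  -- the post: no byte of the shadow region was written
  show ShadowUntouched u.mem s_101820.mem
  v_untouched
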